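-- pv_equiv track=rewrite | github.com/Ollisteka/Chipher_Breaker | logic/decryptor.py | make_mask
-- ===== SOURCE A (Python) =====
-- def make_mask(word):
--     """
--     Match each letter of the word with a digit
--     :type word: str
--     :return:
--     """
--     next_num = 0
--     letter_nums = {}
--     word_mask = []
--     for letter in word:
--         if letter not in letter_nums:
--             letter_nums[letter] = str(next_num)
--             next_num += 1
--         word_mask.append(letter_nums[letter])
--     return ''.join(word_mask)
-- ===== SOURCE B (Python) =====
-- def make_mask(word):
--     firsts = sorted(word.find(c) for c in set(word))
--     rank = {word[p]: str(k) for k, p in enumerate(firsts)}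
--     return ''.join(rank[c] for c in word)
-- ===== Notes on version B (the rewrite author's own statement) =====
-- stated objective: alternative
-- what changed: Replaces A's online single loop that grows a letter->digit counter while emitting, by an offline sort-based algorithm: collect each distinct letter's first-occurrence position with str.find, sort those positions, build a letter->rank table from the sorted positions, then translate the word through that table.
import Mathlib
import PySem

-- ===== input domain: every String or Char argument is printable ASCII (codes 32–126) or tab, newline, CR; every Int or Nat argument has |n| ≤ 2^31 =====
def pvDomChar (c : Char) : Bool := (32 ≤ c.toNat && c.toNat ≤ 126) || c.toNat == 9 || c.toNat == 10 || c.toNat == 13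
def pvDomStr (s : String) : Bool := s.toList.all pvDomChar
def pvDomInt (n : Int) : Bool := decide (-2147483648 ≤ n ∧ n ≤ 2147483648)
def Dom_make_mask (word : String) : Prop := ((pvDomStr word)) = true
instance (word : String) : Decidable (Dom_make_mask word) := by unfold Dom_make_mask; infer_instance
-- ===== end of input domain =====

-- B replaces A's online loop (grow a letter->digit counter while emitting) by an offline
-- sort-based algorithm: sort the distinct letters' first-occurrence positions, build a
-- letter->rank table from them, then translate the word; objective: alternative.

-- ===== PORT A =====
-- one loop iteration of A: state = (next_num, letter_nums, word_mask)
def makeMaskStep (st : Int × PySem.Dict Char String × List String) (letter : Char) :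
    Int × PySem.Dict Char String × List String :=
  let st2 : Int × PySem.Dict Char String :=
    if st.2.1.contains letter = false then
      (st.1 + 1, st.2.1.insert letter (PySem.Int.toStr st.1))
    else (st.1, st.2.1)
  -- letter_nums[letter]: the key is always present at this point, so getD "" is exact
  (st2.1, st2.2, st.2.2 ++ [(st2.2.get? letter).getD ""])

def make_mask (word : String) : String :=
  PySem.Str.join "" (word.toList.foldl makeMaskStep (0, PySem.Dict.empty, [])).2.2

-- ===== PORT B =====
def make_mask_alt (word : String) : String :=
  let s := word.toList
  -- firsts = sorted(word.find(c) for c in set(word))  (distinct positions: order-independent)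
  let firsts := PySem.List.sorted ((PySem.Set.ofList s).map (fun c => PySem.Chars.find s [c]))
                  (fun x => x) false
  -- rank = {word[p]: str(k) for k, p in enumerate(firsts)}; every p is in range, so getD ' ' is exact
  let rank : PySem.Dict Char String :=
    PySem.Dict.mk ((PySem.List.enumerate firsts 0).map
      (fun p => ((PySem.List.pyGet? s p.2).getD ' ', PySem.Int.toStr p.1)))
  -- ''.join(rank[c] for c in word); every c of word is a key of rank, so getD "" is exact
  PySem.Str.join "" (s.map (fun c => (rank.get? c).getD ""))

-- ===== PRECONDITION & SPEC =====
def Spec_make_mask (word : String) (out : String) : Prop := out = make_mask_alt word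
instance (word : String) (out : String) : Decidable (Spec_make_mask word out) := by unfold Spec_make_mask; infer_instance

-- ===== CLAIM (what is proved, stated in full; the proofs are below) =====
def Claim_equal_make_mask : Prop := ∀ (word : String), Dom_make_mask word → Spec_make_mask word (make_mask word)

-- ===== LEMMAS AND PROOFS =====

-- the string both sides effectively emit for letter c, given the ordered distinct letters d
def pvEmit (d : List Char) (c : Char) : String :=
  match PySem.List.index? d c with
  | some k => PySem.Int.toStr (k : Int)
  | none => ""

-- A's dict after the distinct letters d have been seen, in order
def pvDict (d : List Char) : PySem.Dict Char String :=
  PySem.Dict.mk ((PySem.List.enumerate d 0).map (fun p => (p.2, PySem.Int.toStr p.1)))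

-- the first-occurrence position of c in s, as Python's find returns it
def pvFirst (s : List Char) (c : Char) : Int :=
  match PySem.List.index? s c with
  | some k => (k : Int)
  | none => -1

lemma pvDict_get?_aux (d : List Char) (n : Int) (c : Char) :
    (PySem.Dict.mk ((PySem.List.enumerate d n).map (fun p => (p.2, PySem.Int.toStr p.1)))).get? c
      = (PySem.List.index? d c).map (fun k : Nat => PySem.Int.toStr (n + (k : Int))) := by
  induction d generalizing n with
  | nil => simp [PySem.List.enumerate_nil, PySem.Dict.get?, PySem.List.index?]
  | cons x xs ih =>
      rw [PySem.List.enumerate_cons]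
      by_cases hx : x = c
      · subst hx
        rw [PySem.List.index?_cons_self]
        simp [PySem.Dict.get?_mk_cons]
      · rw [PySem.List.index?_cons_of_ne xs hx]
        simp only [List.map_cons, PySem.Dict.get?_mk_cons, beq_iff_eq, if_neg hx]
        rw [ih (n + 1)]
        cases PySem.List.index? xs c with
        | none => rfl
        | some k =>
            simp only [Option.map_some]
            have : n + ((k + 1 : Nat) : Int) = n + 1 + (k : Int) := by push_cast; ring
            rw [this]

lemma pvDict_get? (d : List Char) (c : Char) :
    (pvDict d).get? c = (PySem.List.index? d c).map (fun k : Nat => PySem.Int.toStr (k : Int)) := by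
  rw [pvDict, pvDict_get?_aux]
  cases PySem.List.index? d c <;> simp

lemma pvDict_contains_aux (d : List Char) (c : Char) (n : Int) :
    (((PySem.List.enumerate d n).map (fun p => (p.2, PySem.Int.toStr p.1))).any
        (fun p => p.1 == c)) = decide (c ∈ d) := by
  induction d generalizing n with
  | nil => simp [PySem.List.enumerate_nil]
  | cons x xs ih =>
      rw [PySem.List.enumerate_cons]
      simp only [List.map_cons, List.any_cons, ih, List.mem_cons]
      by_cases hx : x = c
      · simp [hx]
      · have h1 : (x == c) = false := by simp [hx]
        have h2 : decide (c = x) = false := by simp [Ne.symm hx]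
        simp [h1, h2]

lemma pvDict_contains (d : List Char) (c : Char) :
    (pvDict d).contains c = decide (c ∈ d) := by
  simp only [PySem.Dict.contains, pvDict]
  exact pvDict_contains_aux d c 0

lemma pvDict_insert_fresh (d : List Char) (c : Char) (h : c ∉ d) :
    (pvDict d).insert c (PySem.Int.toStr (d.length : Int)) = pvDict (d ++ [c]) := by
  have hcon : (pvDict d).contains c = false := by
    rw [pvDict_contains]; exact decide_eq_false h
  apply PySem.Dict.ext
  rw [PySem.Dict.items_insert_of_not_contains _ _ hcon]
  show _ = (PySem.List.enumerate (d ++ [c]) 0).map (fun p => (p.2, PySem.Int.toStr p.1))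
  rw [PySem.List.enumerate_append, List.map_append, PySem.List.enumerate_cons,
      PySem.List.enumerate_nil]
  simp [pvDict]

-- deduping only appends: dedup (a ++ b) extends dedup a
lemma dedup_append (a b : List Char) :
    PySem.List.dedup (a ++ b) = List.foldl PySem.Set.add (PySem.List.dedup a) b := by
  simp [PySem.List.dedup, PySem.Set.ofList, List.foldl_append]

lemma dedup_append_singleton_mem (p : List Char) (c : Char) (h : c ∈ PySem.List.dedup p) :
    PySem.List.dedup (p ++ [c]) = PySem.List.dedup p := by
  rw [dedup_append, List.foldl_cons, List.foldl_nil, PySem.Set.add, PySem.Set.contains,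
      if_pos (List.contains_iff_mem.mpr h)]

lemma dedup_append_singleton_not_mem (p : List Char) (c : Char)
    (h : c ∉ PySem.List.dedup p) :
    PySem.List.dedup (p ++ [c]) = PySem.List.dedup p ++ [c] := by
  rw [dedup_append, List.foldl_cons, List.foldl_nil, PySem.Set.add, PySem.Set.contains,
      if_neg (fun hcc => h (List.contains_iff_mem.mp hcc))]

-- one step of A, starting from the state reached after the letters of p
lemma makeMaskStep_state (p : List Char) (c : Char) (m : List String) :
    makeMaskStep (((PySem.List.dedup p).length : Int), pvDict (PySem.List.dedup p), m) c
      = (((PySem.List.dedup (p ++ [c])).length : Int), pvDict (PySem.List.dedup (p ++ [c])),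
         m ++ [pvEmit (PySem.List.dedup (p ++ [c])) c]) := by
  by_cases hc : c ∈ PySem.List.dedup p
  · have hcon : (pvDict (PySem.List.dedup p)).contains c = true := by
      rw [pvDict_contains]; exact decide_eq_true hc
    obtain ⟨k, hk⟩ := Option.isSome_iff_exists.1
        ((PySem.List.index?_isSome_iff (PySem.List.dedup p) c).2 hc)
    have hded := dedup_append_singleton_mem p c hc
    simp only [makeMaskStep, hcon, Bool.true_eq_false, if_false, hded,
               pvDict_get?, hk, Option.map_some, Option.getD_some, pvEmit]
  · have hcon : (pvDict (PySem.List.dedup p)).contains c = false := by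
      rw [pvDict_contains]; exact decide_eq_false hc
    have hded := dedup_append_singleton_not_mem p c hc
    have hidx := PySem.List.index?_append_singleton_self (PySem.List.dedup p) c hc
    have hget : ((pvDict (PySem.List.dedup p ++ [c])).get? c).getD ""
        = PySem.Int.toStr ((PySem.List.dedup p).length : Int) := by
      rw [pvDict_get?, hidx]; rfl
    have hemit : pvEmit (PySem.List.dedup p ++ [c]) c
        = PySem.Int.toStr ((PySem.List.dedup p).length : Int) := by
      unfold pvEmit; rw [hidx]
    have hif : ((pvDict (PySem.List.dedup p)).contains c = false) = True := by
      rw [hcon]; exact eq_true rfl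
    simp only [makeMaskStep, hif, if_true, hded, pvDict_insert_fresh _ _ hc,
               hget, hemit, List.length_append, List.length_cons, List.length_nil,
               Prod.mk.injEq]
    push_cast
    trivial

lemma foldl_add_prefix (b : List Char) (s : List Char) :
    ∃ t, List.foldl PySem.Set.add s b = s ++ t := by
  induction b generalizing s with
  | nil => exact ⟨[], by simp⟩
  | cons x xs ih =>
      obtain ⟨t, ht⟩ := ih (PySem.Set.add s x)
      rw [List.foldl_cons, ht, PySem.Set.add]
      split_ifs with h
      · exact ⟨t, rfl⟩
      · exact ⟨[x] ++ t, by simp⟩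

lemma pvEmit_stable (p t : List Char) (c : Char) (h : c ∈ PySem.List.dedup p) :
    pvEmit (PySem.List.dedup (p ++ t)) c = pvEmit (PySem.List.dedup p) c := by
  obtain ⟨s, hs⟩ := foldl_add_prefix t (PySem.List.dedup p)
  rw [dedup_append, hs, pvEmit, pvEmit, PySem.List.index?_append_of_mem _ h]

-- A's whole loop, generalized over an already-processed prefix p
lemma foldA (l p : List Char) (m : List String) :
    l.foldl makeMaskStep (((PySem.List.dedup p).length : Int), pvDict (PySem.List.dedup p), m)
      = (((PySem.List.dedup (p ++ l)).length : Int), pvDict (PySem.List.dedup (p ++ l)),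
         m ++ l.map (pvEmit (PySem.List.dedup (p ++ l)))) := by
  induction l generalizing p m with
  | nil => simp
  | cons c t ih =>
      rw [List.foldl_cons, makeMaskStep_state, ih (p ++ [c])]
      have hpc : (p ++ [c]) ++ t = p ++ c :: t := by simp
      have hmem : c ∈ PySem.List.dedup (p ++ [c]) := by
        rw [PySem.List.mem_dedup]; simp
      have hhead : pvEmit (PySem.List.dedup (p ++ c :: t)) c
          = pvEmit (PySem.List.dedup (p ++ [c])) c := by
        rw [← hpc]; exact pvEmit_stable (p ++ [c]) t c hmem
      rw [hpc, List.map_cons, hhead]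
      simp


-- ---- B-side lemmas: the sorted first-occurrence positions name the dedup order ----

lemma pvFirst_of_index? (s : List Char) (c : Char) (k : Nat)
    (h : PySem.List.index? s c = some k) : pvFirst s c = (k : Int) := by
  unfold pvFirst; rw [h]

lemma single_prefix_drop (s : List Char) (c : Char) (i : Nat) (hi : i < s.length) :
    ([c] <+: s.drop i ↔ s[i] = c) := by
  rw [List.drop_eq_getElem_cons hi]
  constructor
  · rintro ⟨t, ht⟩
    have := (List.cons.injEq c t s[i] (List.drop (i+1) s)).mp ht
    exact this.1.symm
  · intro h; exact ⟨List.drop (i+1) s, by simp [h]⟩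

-- word.find(c) for a single character c of the word is its first-occurrence index
lemma find_singleton (s : List Char) (c : Char) (k : Nat)
    (h : PySem.List.index? s c = some k) : PySem.Chars.find s [c] = (k : Int) := by
  obtain ⟨hk, hck, hmin⟩ := PySem.List.getElem_of_index?_eq_some h
  have hpre : [c] <+: s.drop k := (single_prefix_drop s c k hk).mpr hck
  have hinf : [c] <:+: s := hpre.isInfix.trans (s.drop_suffix k).isInfix
  have hnn : 0 ≤ PySem.Chars.find s [c] := (PySem.Chars.find_nonneg_iff s [c]).mpr hinf
  obtain ⟨hp, hm⟩ := PySem.Chars.find_spec hnn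
  set m := (PySem.Chars.find s [c]).toNat with hmdef
  have hmlt : m < s.length := by
    by_contra hge
    rw [List.drop_eq_nil_of_le (Nat.le_of_not_lt hge)] at hp
    exact (List.cons_ne_nil c []) (List.prefix_nil.mp hp)
  have hmk : m = k := by
    rcases lt_trichotomy m k with h1 | h1 | h1
    · exact absurd ((single_prefix_drop s c m hmlt).mp hp) (hmin m h1)
    · exact h1
    · exact absurd hpre (hm k h1)
  omega

lemma find_eq_pvFirst (s : List Char) (c : Char) (h : c ∈ s) :
    PySem.Chars.find s [c] = pvFirst s c := by
  obtain ⟨k, hk⟩ := Option.isSome_iff_exists.1 ((PySem.List.index?_isSome_iff s c).2 h)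
  rw [find_singleton s c k hk, pvFirst_of_index? s c k hk]

lemma enumerate_map {α β : Type} (f : α → β) (l : List α) (n : Int) :
    PySem.List.enumerate (l.map f) n = (PySem.List.enumerate l n).map (fun p => (p.1, f p.2)) := by
  induction l generalizing n with
  | nil => simp [PySem.List.enumerate_nil]
  | cons x xs ih => simp [PySem.List.enumerate_cons, ih]

lemma pvFirst_append_of_mem (s t : List Char) (c : Char) (h : c ∈ s) :
    pvFirst (s ++ t) c = pvFirst s c := by
  unfold pvFirst
  rw [PySem.List.index?_append_of_mem t h]

lemma pvFirst_lt_length (s : List Char) (c : Char) (h : c ∈ s) :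
    0 ≤ pvFirst s c ∧ pvFirst s c < (s.length : Int) := by
  obtain ⟨k, hk⟩ := Option.isSome_iff_exists.1 ((PySem.List.index?_isSome_iff s c).2 h)
  obtain ⟨hlt, _, _⟩ := PySem.List.getElem_of_index?_eq_some hk
  rw [pvFirst_of_index? s c k hk]
  exact ⟨Int.natCast_nonneg k, by exact_mod_cast hlt⟩

lemma dedup_sub (s : List Char) : ∀ c ∈ PySem.List.dedup s, c ∈ s :=
  fun c hc => (PySem.List.mem_dedup s c).1 hc

-- first-occurrence positions along the dedup order are strictly increasing
lemma dedup_firsts (s : List Char) :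
    ((PySem.List.dedup s).map (pvFirst s)).Pairwise (· < ·) := by
  induction s using List.reverseRecOn with
  | nil => simp [PySem.List.dedup, PySem.Set.ofList]
  | append_singleton p c ih =>
      have hmap : (PySem.List.dedup p).map (pvFirst (p ++ [c]))
          = (PySem.List.dedup p).map (pvFirst p) :=
        List.map_congr_left (fun a ha => pvFirst_append_of_mem p [c] a (dedup_sub p a ha))
      by_cases hc : c ∈ PySem.List.dedup p
      · rw [dedup_append_singleton_mem p c hc, hmap]; exact ih
      · rw [dedup_append_singleton_not_mem p c hc, List.map_append, hmap, List.pairwise_append]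
        refine ⟨ih, by simp, ?_⟩
        intro a ha b hb
        simp only [List.map_cons, List.map_nil, List.mem_singleton] at hb
        subst hb
        obtain ⟨x, hx, rfl⟩ := List.mem_map.1 ha
        have h1 := pvFirst_lt_length p x (dedup_sub p x hx)
        have hcp : c ∉ p := fun h => hc ((PySem.List.mem_dedup p c).2 h)
        rw [pvFirst_of_index? _ _ _ (PySem.List.index?_append_singleton_self p c hcp)]
        exact h1.2

-- the rank table B builds is exactly A's final dict
lemma alt_rank_eq_pvDict (s : List Char) :
    PySem.Dict.mk ((PySem.List.enumerate
        (PySem.List.sorted ((PySem.Set.ofList s).map (fun c => PySem.Chars.find s [c]))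
          (fun x => x) false) 0).map
      (fun p => ((PySem.List.pyGet? s p.2).getD ' ', PySem.Int.toStr p.1)))
      = pvDict (PySem.List.dedup s) := by
  have hofl : (PySem.Set.ofList s : List Char) = PySem.List.dedup s :=
    (PySem.List.dedup_eq_ofList s).symm
  have hmap : (PySem.List.dedup s).map (fun c => PySem.Chars.find s [c])
      = (PySem.List.dedup s).map (pvFirst s) :=
    List.map_congr_left (fun a ha => find_eq_pvFirst s a (dedup_sub s a ha))
  have hsorted : PySem.List.sorted ((PySem.List.dedup s).map (pvFirst s)) (fun x => x) false
      = (PySem.List.dedup s).map (pvFirst s) :=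
    PySem.List.sorted_eq_self_of_pairwise _ _ ((dedup_firsts s).imp le_of_lt)
  rw [hofl, hmap, hsorted, enumerate_map, List.map_map, pvDict]
  congr 1
  apply List.map_congr_left
  intro p hp
  obtain ⟨k, hk, rfl⟩ := (PySem.List.mem_enumerate_iff _ _ _).1 hp
  have hd : (PySem.List.dedup s)[k] ∈ s := dedup_sub s _ (List.getElem_mem hk)
  obtain ⟨j, hj⟩ := Option.isSome_iff_exists.1 ((PySem.List.index?_isSome_iff s _).2 hd)
  obtain ⟨hjlt, hsj, _⟩ := PySem.List.getElem_of_index?_eq_some hj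
  simp only [Function.comp, pvFirst_of_index? _ _ _ hj]
  simp [hjlt, hsj]

-- for every character, B's dict lookup emits the same string as pvEmit
lemma pvDict_getD_eq_pvEmit (d : List Char) (c : Char) :
    ((pvDict d).get? c).getD "" = pvEmit d c := by
  rw [pvDict_get?, pvEmit]
  cases PySem.List.index? d c <;> rfl

-- ===== VERDICT (by name: the statement is the Claim_ definition above) =====
theorem make_mask_spec : Claim_equal_make_mask := by
  intro word _
  unfold Spec_make_mask make_mask make_mask_alt
  have h0 : ((0 : Int), (PySem.Dict.empty : PySem.Dict Char String), ([] : List String))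
      = (((PySem.List.dedup ([] : List Char)).length : Int), pvDict (PySem.List.dedup []), []) := rfl
  rw [h0, foldA word.toList [] []]
  simp only [List.nil_append]
  rw [alt_rank_eq_pvDict word.toList]
  congr 1
  exact (List.map_congr_left (fun c _ => pvDict_getD_eq_pvEmit _ c)).symm
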